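-- pv_equiv track=rewrite | github.com/spy1130/study-notes | code_python/cs61a/project/hog/hog_hualiang.py | picky_piggy
-- ===== SOURCE A (Python) =====
-- def picky_piggy(score):
--     """Return the points scored from rolling 0 dice.
--
--     score:  The opponent's current score.0.0142857
--     """
--     # BEGIN PROBLEM 2
--     n = score % 6
--     if n:
--         dividend, divisor = 1, 70
--         while n:
--             dividend = dividend*10 % divisor
--             n -= 1
--         return dividend*10 // divisor
--     else:
--         return 7
-- ===== SOURCE B (Python) =====
-- # B: constant-time table lookup of the six repeating decimal digits of 1/7,
-- # replacing A's long-division while-loop (objective: simpler).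
-- DIGITS = (7, 1, 4, 2, 8, 5)
--
-- def picky_piggy(score):
--     return DIGITS[score % 6]
-- ===== Notes on version B (the rewrite author's own statement) =====
-- stated objective: simpler
-- what changed: Replaced the iterative long-division loop computing digits of 1/7 with a direct lookup into the precomputed six-digit repeating cycle indexed by score % 6.
import Mathlib
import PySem

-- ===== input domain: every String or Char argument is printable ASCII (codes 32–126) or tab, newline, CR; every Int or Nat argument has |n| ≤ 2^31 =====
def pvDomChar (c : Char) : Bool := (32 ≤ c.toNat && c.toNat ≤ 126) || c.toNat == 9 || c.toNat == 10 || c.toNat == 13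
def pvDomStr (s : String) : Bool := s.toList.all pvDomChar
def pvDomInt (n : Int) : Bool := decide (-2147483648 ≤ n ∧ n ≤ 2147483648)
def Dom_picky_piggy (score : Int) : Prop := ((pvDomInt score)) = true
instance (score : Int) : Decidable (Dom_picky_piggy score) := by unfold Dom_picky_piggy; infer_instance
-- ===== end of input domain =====

-- B replaces A's long-division while-loop with a lookup into the precomputed
-- six-digit repeating cycle of 1/7 (objective: simpler).

-- ===== PORT A =====
-- the 'while n:' loop, counted down; n = score % 6 is nonnegative (positive divisor),
-- so running it n.toNat times is exact
def pickyLoop : Nat → Int → Int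
  | 0, dividend => dividend
  | Nat.succ k, dividend => pickyLoop k (PySem.Int.mod (dividend * 10) 70)

def picky_piggy (score : Int) : Int :=
  let n := PySem.Int.mod score 6
  if n ≠ 0 then
    PySem.Int.floordiv (pickyLoop n.toNat 1 * 10) 70
  else
    7

-- ===== PORT B =====
def pickyDigits : List Int := [7, 1, 4, 2, 8, 5]

def picky_piggy_alt (score : Int) : Int :=
  (PySem.List.pyGet? pickyDigits (PySem.Int.mod score 6)).getD 0

-- ===== PRECONDITION & SPEC =====
def Spec_picky_piggy (score : Int) (out : Int) : Prop := out = picky_piggy_alt score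
instance (score : Int) (out : Int) : Decidable (Spec_picky_piggy score out) := by unfold Spec_picky_piggy; infer_instance

-- ===== CLAIM (what is proved, stated in full; the proofs are below) =====
def Claim_equal_picky_piggy : Prop := ∀ (score : Int), Dom_picky_piggy score → Spec_picky_piggy score (picky_piggy score)

-- ===== LEMMAS AND PROOFS =====
theorem picky_agree (score : Int) : picky_piggy score = picky_piggy_alt score := by
  have hm : PySem.Int.mod score 6 = score % 6 :=
    PySem.Int.mod_eq_emod_of_pos (by norm_num)
  have h0 : 0 ≤ score % 6 := Int.emod_nonneg _ (by norm_num)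
  have h6 : score % 6 < 6 := Int.emod_lt_of_pos _ (by norm_num)
  have hcases : score % 6 = 0 ∨ score % 6 = 1 ∨ score % 6 = 2 ∨ score % 6 = 3 ∨
      score % 6 = 4 ∨ score % 6 = 5 := by omega
  rcases hcases with h | h | h | h | h | h <;>
    simp only [picky_piggy, picky_piggy_alt, hm, h] <;> decide

-- ===== VERDICT (by name: the statement is the Claim_ definition above) =====
theorem picky_piggy_spec : Claim_equal_picky_piggy := by
  intro score _
  exact picky_agree score
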